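-- pv_equiv track=rewrite | github.com/diogoantunes25/lvm-project | proj-1/python/nonoguru.py | all_possible
-- ===== SOURCE A (Python) =====
-- def all_possible(gaps, size):
--     """
--     Returns all possible start configurations given the gaps and the line size.
--     """
--
--     if len(gaps) == 0:
--         return []
--
--     g = gaps[0]
--     min_start = 0
--     max_start = (size-g) - (sum(gaps[1:]) + (len(gaps)-1))
--
--     if len(gaps) == 1:
--         return list(map(lambda x: [x], range(min_start, max_start+1)))
--
--     ans = []
--     for start in range(min_start, max_start+1):
--         offset = start + g + 1
--         for relative_positions in all_possible(gaps[1:], size - offset):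
--             positions = [start] + list(map(lambda p: p + offset, relative_positions))
--             ans += [positions]
--
--     return ans
-- ===== SOURCE B (Python) =====
-- def all_possible(gaps, size):
--     """
--     Returns all possible start configurations given the gaps and the line size.
--
--     Single DFS threading the cumulative base offset and the remaining slack,
--     emitting each absolute position exactly once into the accumulator.
--     """
--     if not gaps:
--         return []
--     res = []
--     slack = size - sum(gaps) - (len(gaps) - 1)
--
--     def go(i, base, slack_left, acc):
--         if i == len(gaps):
--             res.append(acc)
--             return
--         for s in range(slack_left + 1):
--             go(i + 1, base + s + gaps[i] + 1, slack_left - s, acc + [base + s])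
--
--     go(0, 0, slack, [])
--     return res
-- ===== Notes on version B (the rewrite author's own statement) =====
-- stated objective: alternative
-- what changed: Replaces A's recursion that returns relative position lists and re-shifts every element at each level by a single DFS that threads the cumulative base offset and remaining slack, writing each absolute position exactly once into the accumulator.
import Mathlib
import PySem

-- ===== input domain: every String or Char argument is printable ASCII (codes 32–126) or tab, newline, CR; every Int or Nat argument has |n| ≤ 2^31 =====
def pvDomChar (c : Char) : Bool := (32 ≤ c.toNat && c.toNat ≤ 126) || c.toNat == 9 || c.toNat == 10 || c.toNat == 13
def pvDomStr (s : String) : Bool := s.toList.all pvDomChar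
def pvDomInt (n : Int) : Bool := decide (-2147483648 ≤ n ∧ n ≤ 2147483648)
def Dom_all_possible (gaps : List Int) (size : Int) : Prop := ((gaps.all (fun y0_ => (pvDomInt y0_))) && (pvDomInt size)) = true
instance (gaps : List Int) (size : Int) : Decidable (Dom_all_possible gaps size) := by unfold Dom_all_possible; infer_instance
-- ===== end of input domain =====

-- B replaces A's per-level recursion that shifts every relative position by a single
-- DFS threading the cumulative base offset and the remaining slack, writing each
-- absolute position once; objective: alternative.

-- ===== PORT A =====
def all_possible : List Int → Int → List (List Int)
  | [], _ => []
  | g :: rest, size =>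
    let max_start : Int := (size - g) - (rest.sum + ((rest.length : Int)))
    if rest.isEmpty then
      (PySem.List.pyRange 0 (max_start + 1) 1).map (fun x => [x])
    else
      (PySem.List.pyRange 0 (max_start + 1) 1).foldl
        (fun ans start =>
          let offset := start + g + 1
          ans ++ (all_possible rest (size - offset)).map
            (fun rel => start :: rel.map (fun p => p + offset))) []

-- ===== PORT B =====
-- Source B's `go(i, base, slack_left, acc)` walks gaps from index i; the Lean port
-- recurses on the corresponding suffix of gaps (same steps, same order).
def all_possible_alt_go : List Int → Int → Int → List Int → List (List Int)
  | [], _, _, acc => [acc]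
  | g :: rest, base, slack_left, acc =>
    (PySem.List.pyRange 0 (slack_left + 1) 1).foldl
      (fun res s =>
        res ++ all_possible_alt_go rest (base + s + g + 1) (slack_left - s) (acc ++ [base + s])) []

def all_possible_alt (gaps : List Int) (size : Int) : List (List Int) :=
  if gaps.isEmpty then []
  else all_possible_alt_go gaps 0 (size - gaps.sum - ((gaps.length : Int) - 1)) []

-- ===== PRECONDITION & SPEC =====
def Spec_all_possible (gaps : List Int) (size : Int) (out : List (List Int)) : Prop := out = all_possible_alt gaps size
instance (gaps : List Int) (size : Int) (out : List (List Int)) : Decidable (Spec_all_possible gaps size out) := by unfold Spec_all_possible; infer_instance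

-- ===== CLAIM (what is proved, stated in full; the proofs are below) =====
def Claim_equal_all_possible : Prop := ∀ (gaps : List Int) (size : Int), Dom_all_possible gaps size → Spec_all_possible gaps size (all_possible gaps size)

-- ===== LEMMAS AND PROOFS =====

theorem flatMap_congr_mem {α β : Type} (l : List α) (f g : α → List β)
    (h : ∀ a ∈ l, f a = g a) : l.flatMap f = l.flatMap g := by
  induction l with
  | nil => rfl
  | cons x xs ih =>
    simp only [List.flatMap_cons, h x (List.mem_cons_self),
      ih (fun a ha => h a (List.mem_cons_of_mem _ ha))]

-- one-step unfolding of the recursive definitions (keeps rewriting under control)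
theorem go_cons (g : Int) (rest : List Int) (base slack acc) :
    all_possible_alt_go (g :: rest) base slack acc =
      (PySem.List.pyRange 0 (slack + 1) 1).foldl
        (fun res s =>
          res ++ all_possible_alt_go rest (base + s + g + 1) (slack - s) (acc ++ [base + s])) [] := rfl

theorem A_cons (g : Int) (rest : List Int) (size : Int) :
    all_possible (g :: rest) size =
      (if rest.isEmpty then
        (PySem.List.pyRange 0 ((size - g) - (rest.sum + ((rest.length : Int))) + 1) 1).map (fun x => [x])
      else
        (PySem.List.pyRange 0 ((size - g) - (rest.sum + ((rest.length : Int))) + 1) 1).foldl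
          (fun ans start =>
            ans ++ (all_possible rest (size - (start + g + 1))).map
              (fun rel => start :: rel.map (fun p => p + (start + g + 1)))) []) := rfl

-- Core invariant: B's DFS on a nonempty suffix, with base offset `base`, the slack
-- corresponding to remaining line size `size`, and prefix `acc`, produces exactly
-- A's (relative) answers shifted by `base` and prefixed by `acc`.
theorem go_eq : ∀ (gs : List Int), gs ≠ [] → ∀ (size base slack : Int) (acc : List Int),
    slack = size - gs.sum - ((gs.length : Int) - 1) →
    all_possible_alt_go gs base slack acc
      = (all_possible gs size).map (fun l => acc ++ l.map (fun p => p + base)) := by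
  intro gs
  induction gs with
  | nil => intro h; exact absurd rfl h
  | cons g rest ih =>
    intro _ size base slack acc hs
    have hend : slack + 1 = (size - g) - (rest.sum + ((rest.length : Int))) + 1 := by
      simp only [hs, List.sum_cons, List.length_cons]; push_cast; ring
    cases rest with
    | nil =>
      rw [go_cons, A_cons, if_pos (show ([] : List Int).isEmpty = true from rfl), hend]
      rw [PySem.List.foldl_append_eq_flatMap, List.nil_append, List.map_map]
      rw [List.map_eq_flatMap]
      apply flatMap_congr_mem
      intro a _
      show [acc ++ [base + a]] = [((fun l => acc ++ List.map (fun p => p + base) l) ∘ fun x => [x]) a]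
      simp only [Function.comp_apply, List.map_cons, List.map_nil]
      rw [Int.add_comm base a]
    | cons g2 rest2 =>
      rw [go_cons, A_cons, if_neg (by simp), hend]
      rw [PySem.List.foldl_append_eq_flatMap, PySem.List.foldl_append_eq_flatMap,
        List.nil_append, List.nil_append, List.map_flatMap]
      apply flatMap_congr_mem
      intro s _
      have hs' : slack - s = (size - (s + g + 1)) - (g2 :: rest2).sum - (((g2 :: rest2).length : Int) - 1) := by
        simp only [hs, List.sum_cons, List.length_cons]; push_cast; ring
      rw [ih (by simp) (size - (s + g + 1)) (base + s + g + 1) (slack - s) (acc ++ [base + s]) hs']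
      rw [List.map_map]
      apply List.map_congr_left
      intro l _
      simp only [Function.comp_apply, List.map_cons, List.map_map, List.append_assoc,
        List.singleton_append]
      rw [Int.add_comm base s]
      congr 2
      apply List.map_congr_left
      intro p _
      simp only [Function.comp_apply]
      ring

-- ===== VERDICT (by name: the statement is the Claim_ definition above) =====
theorem all_possible_spec : Claim_equal_all_possible := by
  intro gaps size _
  unfold Spec_all_possible all_possible_alt
  cases gaps with
  | nil => simp [all_possible]
  | cons g rest =>
    rw [if_neg (by simp)]
    rw [go_eq (g :: rest) (by simp) size 0 _ [] rfl]
    simp
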